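-- pv_equiv track=rewrite | github.com/frenesyyyyy/NUCLEAR-CORE | nodes/source_matrix.py | check_trust_anchor_presence
-- ===== SOURCE A (Python) =====
-- def check_trust_anchor_presence(
--     all_source_urls: list[str],
--     pack: dict,
-- ) -> list[str]:
--     """Return which trust anchor patterns were found in the source list."""
--     found = []
--     anchors = pack.get("trust_anchors", [])
--     for anchor in anchors:
--         for url in all_source_urls:
--             if anchor in url.lower():
--                 found.append(anchor)
--                 break
--     return found
-- ===== SOURCE B (Python) =====
-- def check_trust_anchor_presence(
--     all_source_urls: list[str],
--     pack: dict,
-- ) -> list[str]: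
--     """Return which trust anchor patterns were found in the source list."""
--     anchors = pack.get("trust_anchors", [])
--     pending = set(anchors)
--     found = set()
--     for url in all_source_urls:
--         if not pending:
--             break
--         lowered = url.lower()
--         hits = {a for a in pending if a in lowered}
--         found |= hits
--         pending -= hits
--     return [a for a in anchors if a in found]
-- ===== Notes on version B (the rewrite author's own statement) =====
-- stated objective: alternative
-- what changed: B inverts the loop nesting: it lowercases each URL once, matches only the still-pending anchors against it (with an early exit once every anchor is found), accumulates a found-set, and finally filters the anchor list, instead of A's per-anchor rescan that re-lowercases every URL for every anchor.
import Mathlib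
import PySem

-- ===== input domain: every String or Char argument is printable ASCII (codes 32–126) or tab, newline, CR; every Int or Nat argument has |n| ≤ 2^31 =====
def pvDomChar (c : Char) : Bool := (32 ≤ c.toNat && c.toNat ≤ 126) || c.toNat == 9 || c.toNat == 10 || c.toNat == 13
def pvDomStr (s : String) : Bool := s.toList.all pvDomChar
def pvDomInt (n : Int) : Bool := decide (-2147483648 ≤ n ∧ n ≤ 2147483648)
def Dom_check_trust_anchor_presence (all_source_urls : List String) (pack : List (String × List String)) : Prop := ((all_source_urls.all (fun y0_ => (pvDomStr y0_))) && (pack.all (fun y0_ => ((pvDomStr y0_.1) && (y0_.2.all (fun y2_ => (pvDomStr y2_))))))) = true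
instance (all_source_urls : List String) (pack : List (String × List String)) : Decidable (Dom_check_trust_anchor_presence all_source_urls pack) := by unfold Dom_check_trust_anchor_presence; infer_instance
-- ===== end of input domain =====

-- B inverts the loop nesting (lowercase each URL once, match only still-pending anchors, early exit when all are found); same return value, proved equal.

-- ===== PORT A =====
-- inner 'for url in all_source_urls: if anchor in url.lower(): found.append(anchor); break'
def pvAInner (anchor : String) (urls : List String) (found : List String) : List String :=
  match urls with
  | [] => found
  | u :: rest =>
      if PySem.Str.isIn anchor (PySem.Str.lower u) then found ++ [anchor]
      else pvAInner anchor rest found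

def check_trust_anchor_presence (all_source_urls : List String) (pack : List (String × List String)) : List String :=
  let anchors := PySem.Dict.getD ⟨pack⟩ "trust_anchors" []
  anchors.foldl (fun found anchor => pvAInner anchor all_source_urls found) []

-- ===== PORT B =====
-- 'for url in all_source_urls: if not pending: break; …' accumulating found / shrinking pending
def pvBLoop (urls : List String) (pending found : PySem.Set String) : PySem.Set String :=
  match urls with
  | [] => found
  | u :: rest =>
      if List.isEmpty pending then found
      else
        let lowered := PySem.Str.lower u
        let hits : PySem.Set String := List.filter (fun a => PySem.Str.isIn a lowered) pending
        pvBLoop rest (PySem.Set.diff pending hits) (PySem.Set.union found hits)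

def check_trust_anchor_presence_alt (all_source_urls : List String) (pack : List (String × List String)) : List String :=
  let anchors := PySem.Dict.getD ⟨pack⟩ "trust_anchors" []
  let found := pvBLoop all_source_urls (PySem.Set.ofList anchors) PySem.Set.empty
  anchors.filter (fun a => PySem.Set.contains found a)

-- ===== PRECONDITION & SPEC =====
def Spec_check_trust_anchor_presence (all_source_urls : List String) (pack : List (String × List String)) (out : List String) : Prop := out = check_trust_anchor_presence_alt all_source_urls pack
instance (all_source_urls : List String) (pack : List (String × List String)) (out : List String) : Decidable (Spec_check_trust_anchor_presence all_source_urls pack out) := by unfold Spec_check_trust_anchor_presence; infer_instance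

-- ===== CLAIM (what is proved, stated in full; the proofs are below) =====
def Claim_equal_check_trust_anchor_presence : Prop := ∀ (all_source_urls : List String) (pack : List (String × List String)), Dom_check_trust_anchor_presence all_source_urls pack → Spec_check_trust_anchor_presence all_source_urls pack (check_trust_anchor_presence all_source_urls pack)

-- ===== LEMMAS AND PROOFS =====

theorem pvAInner_eq (anchor : String) (urls : List String) (found : List String) :
    pvAInner anchor urls found =
      if urls.any (fun u => PySem.Str.isIn anchor (PySem.Str.lower u)) then found ++ [anchor] else found := by
  induction urls with
  | nil => simp [pvAInner]
  | cons u rest ih =>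
      simp only [pvAInner, List.any_cons, ih]
      by_cases h : PySem.Str.isIn anchor (PySem.Str.lower u) = true
      · rw [if_pos h]
        simp only [h, Bool.true_or, if_true]
      · rw [Bool.not_eq_true] at h
        simp only [h, Bool.false_or, Bool.false_eq_true, if_false]

theorem pvBLoop_mem (a : String) (urls : List String) :
    ∀ (pending found : PySem.Set String),
      a ∈ pvBLoop urls pending found ↔
        a ∈ found ∨ (a ∈ pending ∧ ∃ u ∈ urls, PySem.Str.isIn a (PySem.Str.lower u) = true) := by
  induction urls with
  | nil => intro pending found; simp [pvBLoop]
  | cons u rest ih =>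
      intro pending found
      simp only [pvBLoop]
      by_cases hp : List.isEmpty pending = true
      · rw [List.isEmpty_iff] at hp
        simp [hp]
      · rw [Bool.not_eq_true] at hp
        simp only [hp, Bool.false_eq_true, if_false]
        rw [ih]
        rw [PySem.Set.mem_union, PySem.Set.mem_diff]
        simp only [List.mem_filter, List.mem_cons]
        constructor
        · rintro (⟨hf | ⟨hpa, hhit⟩⟩ | ⟨⟨hpa, hnot⟩, hrest⟩)
          · exact Or.inl hf
          · exact Or.inr ⟨hpa, u, Or.inl rfl, hhit⟩
          · obtain ⟨v, hv, hvh⟩ := hrest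
            exact Or.inr ⟨hpa, v, Or.inr hv, hvh⟩
        · rintro (hf | ⟨hpa, v, (rfl | hv), hvh⟩)
          · exact Or.inl (Or.inl hf)
          · exact Or.inl (Or.inr ⟨hpa, hvh⟩)
          · by_cases hu : PySem.Str.isIn a (PySem.Str.lower u) = true
            · exact Or.inl (Or.inr ⟨hpa, hu⟩)
            · exact Or.inr ⟨⟨hpa, fun h => hu h.2⟩, v, hv, hvh⟩

theorem pvA_foldl (urls : List String) (anchors acc : List String) :
    anchors.foldl (fun found anchor => pvAInner anchor urls found) acc =
      acc ++ anchors.filter (fun a => urls.any (fun u => PySem.Str.isIn a (PySem.Str.lower u))) := by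
  induction anchors generalizing acc with
  | nil => simp
  | cons x xs ih =>
      simp only [List.foldl_cons, List.filter_cons]
      rw [pvAInner_eq, ih]
      by_cases h : (urls.any fun u => PySem.Str.isIn x (PySem.Str.lower u)) = true
      · rw [if_pos h, if_pos h, List.append_assoc, List.singleton_append]
      · rw [if_neg h, if_neg h]

-- ===== VERDICT (by name: the statement is the Claim_ definition above) =====
theorem check_trust_anchor_presence_spec : Claim_equal_check_trust_anchor_presence := by
  intro urls pack _
  unfold Spec_check_trust_anchor_presence check_trust_anchor_presence check_trust_anchor_presence_alt
  simp only
  rw [pvA_foldl, List.nil_append]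
  apply List.filter_congr
  intro a ha
  rw [Bool.eq_iff_iff, PySem.Set.contains_iff, pvBLoop_mem]
  simp [PySem.Set.empty, PySem.Set.mem_ofList, ha, List.any_eq_true]
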